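-- pv_equiv track=rewrite | github.com/asmundur31/LoadManagementBackend | trampette_analysis/ml/models/jump_count_model.py | count
-- ===== SOURCE A (Python) =====
-- def count(labels, min_jump_length=10):
--     count = 0
--     consecutive_ones = 0
--
--     for i in range(1, len(labels)):
--         if labels[i] == 1:
--             consecutive_ones += 1
--         else:
--             if consecutive_ones >= min_jump_length:
--                 count += 1
--             consecutive_ones = 0
--
--     if consecutive_ones >= min_jump_length:
--         count += 1
--
--     return count
-- ===== SOURCE B (Python) =====
-- def count(labels, min_jump_length=10):
--     tail = labels[1:]
--     bounds = [i for i, v in enumerate(tail) if v != 1] + [len(tail)]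
--     return sum(1 for b, p in zip(bounds, [-1] + bounds) if b - p - 1 >= min_jump_length)
-- ===== Notes on version B (the rewrite author's own statement) =====
-- stated objective: alternative
-- what changed: B replaces A's stateful consecutive-ones accumulator with explicit end-of-loop flush by a boundary-index formulation: it collects the indices of non-one elements of labels[1:] plus the end position, and counts gaps between consecutive boundaries that reach min_jump_length.
import Mathlib
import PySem

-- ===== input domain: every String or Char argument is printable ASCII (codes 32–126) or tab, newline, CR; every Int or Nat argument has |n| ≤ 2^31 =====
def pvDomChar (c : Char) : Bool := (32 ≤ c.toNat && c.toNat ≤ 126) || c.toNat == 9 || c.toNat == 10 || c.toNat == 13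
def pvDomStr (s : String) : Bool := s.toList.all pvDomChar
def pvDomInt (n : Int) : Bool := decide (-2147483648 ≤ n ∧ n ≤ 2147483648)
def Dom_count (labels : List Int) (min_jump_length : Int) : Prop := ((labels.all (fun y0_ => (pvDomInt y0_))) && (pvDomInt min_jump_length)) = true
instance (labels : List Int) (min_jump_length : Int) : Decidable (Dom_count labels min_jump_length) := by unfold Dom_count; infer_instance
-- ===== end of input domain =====

-- B counts jumps via boundary indices (positions of non-one elements plus the end) and gap
-- lengths between consecutive boundaries, instead of A's running accumulator with final flush.

-- ===== PORT A =====
def count (labels : List Int) (min_jump_length : Int) : Int :=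
  let s := (PySem.List.pyRange 1 (labels.length : Int) 1).foldl
    (fun (st : Int × Int) i =>
      if PySem.List.pyGetD labels i 0 = 1 then (st.1, st.2 + 1)
      else (if st.2 ≥ min_jump_length then st.1 + 1 else st.1, 0))
    (0, 0)
  if s.2 ≥ min_jump_length then s.1 + 1 else s.1

-- ===== PORT B =====
def count_alt (labels : List Int) (min_jump_length : Int) : Int :=
  let tail := PySem.List.slice labels (some 1) none
  let bounds := ((PySem.List.enumerate tail 0).filter (fun p => p.2 != 1)).map (fun p => p.1)
                  ++ [(tail.length : Int)]
  (((bounds.zip ((-1 : Int) :: bounds)).filter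
      (fun p => decide (p.1 - p.2 - 1 ≥ min_jump_length))).length : Int)

-- ===== PRECONDITION & SPEC =====
def Spec_count (labels : List Int) (min_jump_length : Int) (out : Int) : Prop := out = count_alt labels min_jump_length
instance (labels : List Int) (min_jump_length : Int) (out : Int) : Decidable (Spec_count labels min_jump_length out) := by unfold Spec_count; infer_instance

-- ===== CLAIM (what is proved, stated in full; the proofs are below) =====
def Claim_equal_count : Prop := ∀ (labels : List Int) (min_jump_length : Int), Dom_count labels min_jump_length → Spec_count labels min_jump_length (count labels min_jump_length)

-- ===== LEMMAS AND PROOFS =====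

-- common functional spec: pvF m k l = number of "flushes" with run length ≥ m, where k ones precede l
def pvF (m k : Int) : List Int → Int
  | [] => if k ≥ m then 1 else 0
  | x :: t => if x = 1 then pvF m (k+1) t else (if k ≥ m then 1 else 0) + pvF m 0 t

-- boundary list of l when enumeration starts at off
def pvBounds (off : Int) : List Int → List Int
  | [] => [off]
  | x :: t => if x = 1 then pvBounds (off+1) t else off :: pvBounds (off+1) t

theorem pvA_loop (m : Int) (l : List Int) : ∀ (c k : Int),
    (match l.foldl
        (fun (st : Int × Int) x =>
          if x = 1 then (st.1, st.2 + 1)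
          else (if st.2 ≥ m then st.1 + 1 else st.1, 0)) (c, k) with
     | s => if s.2 ≥ m then s.1 + 1 else s.1) = c + pvF m k l := by
  induction l with
  | nil => intro c k; simp [pvF]; split_ifs <;> ring
  | cons x t ih =>
    intro c k
    by_cases hx : x = 1
    · simpa [List.foldl, hx, pvF] using ih c (k+1)
    · simp only [List.foldl, hx, pvF]
      rw [ih]
      split_ifs <;> ring

theorem pvBounds_eq (l : List Int) : ∀ off : Int,
    ((PySem.List.enumerate l off).filter (fun p => p.2 != 1)).map (fun p => p.1)
      ++ [off + (l.length : Int)] = pvBounds off l := by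
  induction l with
  | nil => intro off; simp [PySem.List.enumerate_nil, pvBounds]
  | cons x t ih =>
    intro off
    rw [PySem.List.enumerate_cons]
    by_cases hx : x = 1
    · have hb : pvBounds off (x :: t) = pvBounds (off+1) t := by simp [pvBounds, hx]
      rw [hb, List.filter_cons]
      have hc : (((off, x).2 != 1)) = false := by simp [hx]
      rw [hc]
      simpa [add_comm, add_left_comm, add_assoc] using ih (off + 1)
    · have hb : pvBounds off (x :: t) = off :: pvBounds (off+1) t := by simp [pvBounds, hx]
      rw [hb, List.filter_cons]
      have hc : (((off, x).2 != 1)) = true := by simp [hx]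
      rw [hc]
      rw [← ih (off + 1)]
      simp [add_comm, add_left_comm]

theorem pvGaps (m : Int) (l : List Int) : ∀ (off prev : Int),
    ((((pvBounds off l).zip (prev :: pvBounds off l)).filter
        (fun p => decide (p.1 - p.2 - 1 ≥ m))).length : Int)
      = pvF m (off - prev - 1) l := by
  induction l with
  | nil =>
    intro off prev
    simp only [pvBounds, List.zip_cons_cons, List.zip_nil_left, List.filter, pvF]
    split_ifs with h
    · simp [h]
    · simp [h]
  | cons x t ih =>
    intro off prev
    by_cases hx : x = 1
    · have hb : pvBounds off (x :: t) = pvBounds (off+1) t := by simp [pvBounds, hx]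
      have hf : pvF m (off - prev - 1) (x :: t) = pvF m (off - prev - 1 + 1) t := by
        simp [pvF, hx]
      rw [hb, hf]
      have he : off + 1 - prev - 1 = off - prev - 1 + 1 := by ring
      rw [← he, ih (off + 1) prev]
    · have hb : pvBounds off (x :: t) = off :: pvBounds (off+1) t := by simp [pvBounds, hx]
      have hf : pvF m (off - prev - 1) (x :: t)
          = (if off - prev - 1 ≥ m then 1 else 0) + pvF m 0 t := by simp [pvF, hx]
      rw [hb, hf, List.zip_cons_cons, List.filter_cons]
      have hz : off + 1 - off - 1 = 0 := by ring
      have hrest := ih (off + 1) off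
      rw [hz] at hrest
      by_cases hg : off - prev - 1 ≥ m
      · have hd : (decide ((off, prev).1 - (off, prev).2 - 1 ≥ m)) = true := by
          simpa using hg
        rw [hd, if_pos rfl, List.length_cons, if_pos hg]
        push_cast
        rw [hrest]
        ring
      · have hd : (decide ((off, prev).1 - (off, prev).2 - 1 ≥ m)) = false := by
          simpa using hg
        rw [hd, if_neg hg]
        simp only [Bool.false_eq_true, if_false]
        simpa using hrest

theorem countA_eq (labels : List Int) (m : Int) :
    count labels m = pvF m 0 (labels.drop 1) := by
  unfold count
  have hA := PySem.List.foldl_pyRange_pyGetD'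
      (f := fun (st : Int × Int) x =>
        if x = 1 then (st.1, st.2 + 1)
        else (if st.2 ≥ m then st.1 + 1 else st.1, 0))
      (xs := labels) (a := 1) (d := 0) (init := ((0 : Int), (0 : Int))) (by norm_num)
  simp only [Int.toNat_one] at hA
  simp only [hA]
  simpa using pvA_loop m (labels.drop 1) 0 0

theorem countB_eq (labels : List Int) (m : Int) :
    count_alt labels m = pvF m 0 (labels.drop 1) := by
  unfold count_alt
  rw [PySem.List.slice_from_one]
  rw [← List.drop_one]
  have hB := pvBounds_eq (labels.drop 1) 0
  rw [zero_add] at hB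
  simp only [hB]
  have := pvGaps m (labels.drop 1) 0 (-1)
  simpa using this

-- ===== VERDICT (by name: the statement is the Claim_ definition above) =====
theorem count_spec : Claim_equal_count := by
  intro labels m _
  unfold Spec_count
  rw [countA_eq, countB_eq]
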